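-- pv_equiv track=rewrite | github.com/pypi-data/pypi-mirror-360 | packages/vnerrant/vnerrant-2.0.6.tar.gz/vnerrant-2.0.6/vnerrant/components/en/postprocessor.py | __find_prev_token_span
-- ===== SOURCE A (Python) =====
-- def __find_prev_token_span(current_start_char: int, sequence: str, order: int = 1) -> tuple[int, int]:
--     """
--     Find the span of the n-th previous token in the sequence.
--
--     Args:
--         current_start_char (int): start index of the current token
--         sequence           (str): the full text
--         order              (int): which previous token to find (1 = first previous, 2 = second previous, ...)
--
--     Returns:
--         (start, end) span of the requested previous token
--     """
--     end = current_start_char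
--     start = current_start_char
--
--     for _ in range(order):
--         found_end = None
--         # scan backward from just before the current token start
--         for i in range(start - 1, -1, -1):
--             ch = sequence[i]
--             # first non-space we encounter marks the end of the previous token
--             if not ch.isspace() and found_end is None:
--                 found_end = i + 1
--             # once we've marked the end, the next space marks the start boundary
--             elif found_end is not None and ch.isspace():
--                 start, end = i + 1, found_end
--                 break
--         else:
--             # reached the beginning of the string
--             if found_end is None:
--                 raise ValueError("No previous token found")
--             start, end = 0, found_end
--
--     return start, end
-- ===== SOURCE B (Python) =====
-- def __find_prev_token_span(current_start_char: int, sequence: str, order: int = 1) -> tuple[int, int]: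
--     """Index all token spans in the prefix once, then pick the order-th from the end."""
--     if order <= 0:
--         return (current_start_char, current_start_char)
--     spans = []
--     start = None
--     for i in range(current_start_char):
--         ch = sequence[i]
--         if ch.isspace():
--             if start is not None:
--                 spans.append((start, i))
--                 start = None
--         else:
--             if start is None:
--                 start = i
--     if start is not None:
--         spans.append((start, current_start_char))
--     if len(spans) < order:
--         raise ValueError("No previous token found")
--     return spans[-order]
-- ===== Notes on version B (the rewrite author's own statement) =====
-- stated objective: alternative
-- what changed: Replaces A's repeated lazy backward scans (one per order) with a single forward pass that indexes all token spans in the prefix and then selects spans[-order].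
import Mathlib
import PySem

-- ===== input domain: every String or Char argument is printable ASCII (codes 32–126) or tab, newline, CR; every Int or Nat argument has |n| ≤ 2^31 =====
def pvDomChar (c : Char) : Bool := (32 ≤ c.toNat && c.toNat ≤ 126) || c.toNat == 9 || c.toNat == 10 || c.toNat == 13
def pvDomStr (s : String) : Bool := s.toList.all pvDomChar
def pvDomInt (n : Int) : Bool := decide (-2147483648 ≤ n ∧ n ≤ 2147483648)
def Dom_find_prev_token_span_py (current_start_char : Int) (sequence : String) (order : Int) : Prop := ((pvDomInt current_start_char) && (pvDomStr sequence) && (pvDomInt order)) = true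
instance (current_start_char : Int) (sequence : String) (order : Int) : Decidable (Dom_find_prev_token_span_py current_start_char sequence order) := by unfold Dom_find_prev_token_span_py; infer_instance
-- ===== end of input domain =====

-- B replaces A's repeated lazy backward scans (one per `order`) with one forward pass that
-- indexes all token spans of the prefix and selects spans[-order]; alternative decomposition, same cost class.

-- ===== PORT A =====
-- inner backward loop: `for i in range(start-1,-1,-1)` over the index list, with found_end state;
-- `none` result = the ValueError / IndexError path (excluded by Pre_)
def pvAInner (l : List Char) : List Int → Option Int → Option (Int × Int)
  | [], none => none                       -- else-branch, found_end is None: raise ValueError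
  | [], some f => some (0, f)              -- else-branch: start, end = 0, found_end
  | i :: rest, fe =>
    match PySem.List.pyGet? l i with
    | none => none                         -- IndexError (sequence[i])
    | some ch =>
      match fe with
      | none => if ¬ PySem.Chars.isspace ch then pvAInner l rest (some (i + 1)) else pvAInner l rest none
      | some f => if PySem.Chars.isspace ch then some (i + 1, f) else pvAInner l rest (some f)

-- outer loop: `for _ in range(order)`
def pvAOuter (l : List Char) : Nat → Int → Int → Int × Int
  | 0, s, e => (s, e)
  | n + 1, s, e =>
    match pvAInner l (PySem.List.pyRange (s - 1) (-1) (-1)) none with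
    | none => (s, e)                       -- exception path, excluded by Pre_
    | some (s', e') => pvAOuter l n s' e'

def find_prev_token_span_py (current_start_char : Int) (sequence : String) (order : Int) : Int × Int :=
  pvAOuter sequence.toList order.toNat current_start_char current_start_char

-- ===== PORT B =====
-- forward loop: `for i in range(current_start_char)`, collecting closed spans and the open-run start
def pvBScan (l : List Char) : List Int → List (Int × Int) → Option Int → Option (List (Int × Int) × Option Int)
  | [], spans, st => some (spans, st)
  | i :: rest, spans, st =>
    match PySem.List.pyGet? l i with
    | none => none                         -- IndexError (sequence[i]), excluded by Pre_
    | some ch =>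
      if PySem.Chars.isspace ch then
        match st with
        | some s => pvBScan l rest (spans ++ [(s, i)]) none
        | none => pvBScan l rest spans none
      else
        match st with
        | none => pvBScan l rest spans (some i)
        | some s => pvBScan l rest spans (some s)

def find_prev_token_span_py_alt (current_start_char : Int) (sequence : String) (order : Int) : Int × Int :=
  if order ≤ 0 then (current_start_char, current_start_char)
  else
    match pvBScan sequence.toList (PySem.List.pyRange 0 current_start_char 1) [] none with
    | none => (0, 0)                       -- IndexError path, excluded by Pre_
    | some (spans, st) =>
      let spans := spans ++ (match st with | some s => [(s, current_start_char)] | none => [])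
      if (spans.length : Int) < order then (0, 0)   -- ValueError path, excluded by Pre_
      else (PySem.List.pyGet? spans (-order)).getD (0, 0)

-- ===== PRECONDITION & SPEC =====
-- character at Nat index (every use is in range, default is irrelevant)
def pvIsSp (l : List Char) (i : Nat) : Bool := PySem.Chars.isspace (l.getD i ' ')
-- indices in [0, c) that start a maximal non-space run (closed form: non-space whose predecessor is absent or space)
def pvStarts (l : List Char) (c : Nat) : List Nat :=
  (List.range c).filter (fun i => ¬ pvIsSp l i ∧ (i = 0 ∨ pvIsSp l (i - 1)))

-- Pre_ = exactly the inputs where the Python A returns: order ≤ 0 (no iteration), or the prefix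
-- indices are all valid (no IndexError) and it contains at least `order` tokens (no ValueError).
def Pre_find_prev_token_span_py (current_start_char : Int) (sequence : String) (order : Int) : Prop :=
  order ≤ 0 ∨
    (0 ≤ current_start_char ∧ current_start_char ≤ (sequence.toList.length : Int) ∧
      order ≤ ((pvStarts sequence.toList (min current_start_char.toNat sequence.toList.length)).length : Int))
instance (current_start_char : Int) (sequence : String) (order : Int) : Decidable (Pre_find_prev_token_span_py current_start_char sequence order) := by unfold Pre_find_prev_token_span_py; infer_instance

def pvWitness_find_prev_token_span_py : Int × String × Int := (5, "ab cd", 1)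

def Spec_find_prev_token_span_py (current_start_char : Int) (sequence : String) (order : Int) (out : Int × Int) : Prop := out = find_prev_token_span_py_alt current_start_char sequence order
instance (current_start_char : Int) (sequence : String) (order : Int) (out : Int × Int) : Decidable (Spec_find_prev_token_span_py current_start_char sequence order out) := by unfold Spec_find_prev_token_span_py; infer_instance

-- ===== CLAIM (what is proved, stated in full; the proofs are below) =====
def Claim_equal_find_prev_token_span_py : Prop := ∀ (current_start_char : Int) (sequence : String) (order : Int), Dom_find_prev_token_span_py current_start_char sequence order → Pre_find_prev_token_span_py current_start_char sequence order → Spec_find_prev_token_span_py current_start_char sequence order (find_prev_token_span_py current_start_char sequence order)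

-- ===== LEMMAS AND PROOFS =====

-- forward span scan as a structural function on the prefix characters (index `i` is the absolute
-- position of the head character): returns (closed spans, start of the still-open run)
def pvSaP : List Char → Int → Option Int → List (Int × Int) × Option Int
  | [], _, st => ([], st)
  | ch :: t, i, none =>
    if PySem.Chars.isspace ch then pvSaP t (i + 1) none else pvSaP t (i + 1) (some i)
  | ch :: t, i, some s =>
    if PySem.Chars.isspace ch then
      ((s, i) :: (pvSaP t (i + 1) none).1, (pvSaP t (i + 1) none).2)
    else pvSaP t (i + 1) (some s)

-- full span list of the prefix of length k, the open run closed at k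
def pvF (l : List Char) (k : Nat) : List (Int × Int) :=
  (pvSaP (l.take k) 0 none).1 ++
    (match (pvSaP (l.take k) 0 none).2 with | some s => [(s, (k : Int))] | none => [])

-- backward scan of A, structurally on the prefix length
def pvBack (l : List Char) : Nat → Option Int → Option (Int × Int)
  | 0, none => none
  | 0, some f => some (0, f)
  | k + 1, fe =>
    match l[k]? with
    | none => none
    | some ch =>
      match fe with
      | none => if ¬ PySem.Chars.isspace ch then pvBack l k (some ((k : Int) + 1)) else pvBack l k none
      | some f => if PySem.Chars.isspace ch then some ((k : Int) + 1, f) else pvBack l k (some f)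

-- ===== LEMMAS AND PROOFS =====

theorem pvAInner_eq_back (l : List Char) (k : Nat) (fe : Option Int) :
    pvAInner l (PySem.List.pyRange ((k : Int) - 1) (-1) (-1)) fe = pvBack l k fe := by
  induction k generalizing fe with
  | zero =>
    rw [PySem.List.pyRange_neg_one_eq_nil (by omega)]
    cases fe <;> rfl
  | succ k ih =>
    have h1 : ((k + 1 : Nat) : Int) - 1 = (k : Int) := by push_cast; ring
    rw [h1, PySem.List.pyRange_neg_one_cons (by omega)]
    show pvAInner l ((k : Int) :: _) fe = _
    simp only [pvAInner, pvBack, PySem.List.pyGet?_natCast]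
    have h2 : (k : Int) - 1 = (k : Int) - 1 := rfl
    cases h : l[k]? with
    | none => cases fe <;> rfl
    | some ch =>
      cases fe with
      | none =>
        by_cases hs : PySem.Chars.isspace ch <;> simp [hs, ih]
      | some f =>
        by_cases hs : PySem.Chars.isspace ch <;> simp [hs, ih]

theorem pvSaP_snoc (p : List Char) (ch : Char) (i : Int) (st : Option Int) :
    pvSaP (p ++ [ch]) i st =
      (if PySem.Chars.isspace ch then
        ((pvSaP p i st).1 ++ (match (pvSaP p i st).2 with
            | some s => [(s, i + (p.length : Int))] | none => []), none)
      else
        ((pvSaP p i st).1,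
          some (match (pvSaP p i st).2 with | some s => s | none => i + (p.length : Int)))) := by
  induction p generalizing i st with
  | nil =>
    cases st <;> by_cases hs : PySem.Chars.isspace ch <;> simp [pvSaP, hs]
  | cons c t ih =>
    cases st with
    | none =>
      by_cases hc : PySem.Chars.isspace c
      · simp only [List.cons_append, pvSaP, hc, if_true, ih, List.length_cons]
        cases h2 : (pvSaP t (i + 1) none).2 <;>
          by_cases hs : PySem.Chars.isspace ch <;> simp [hs, h2] <;> ring
      · simp only [List.cons_append, pvSaP, hc, ih, List.length_cons]
        cases h2 : (pvSaP t (i + 1) (some i)).2 <;>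
          by_cases hs : PySem.Chars.isspace ch <;> simp [hs, h2] <;> ring
    | some s =>
      by_cases hc : PySem.Chars.isspace c
      · simp only [List.cons_append, pvSaP, hc, if_true, ih, List.length_cons]
        cases h2 : (pvSaP t (i + 1) none).2 <;>
          by_cases hs : PySem.Chars.isspace ch <;> simp [hs, h2] <;> ring
      · simp only [List.cons_append, pvSaP, hc, ih, List.length_cons]
        cases h2 : (pvSaP t (i + 1) (some s)).2 <;>
          by_cases hs : PySem.Chars.isspace ch <;> simp [hs, h2] <;> ring

theorem pvLenTake (l : List Char) (k : Nat) (hk : k ≤ l.length) : (l.take k).length = k := by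
  simp [List.length_take]; omega

theorem pvTake_succ (l : List Char) (k : Nat) (hk : k < l.length) :
    l.take (k + 1) = l.take k ++ [l[k]] := by
  rw [List.take_add_one]
  simp [List.getElem?_eq_getElem hk]

theorem pvBack_some (l : List Char) (k : Nat) (hk : k ≤ l.length) (e : Int) :
    pvBack l k (some e) =
      some ((match (pvSaP (l.take k) 0 none).2 with | some s => s | none => (k : Int)), e) := by
  induction k with
  | zero => simp [pvBack, pvSaP]
  | succ k ih =>
    have hlt : k < l.length := by omega
    rw [pvTake_succ l k hlt]
    simp only [pvBack, List.getElem?_eq_getElem hlt, pvSaP_snoc, pvLenTake l k (le_of_lt hlt)]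
    by_cases hs : PySem.Chars.isspace (l[k]) <;> simp only [hs, if_true]
    · simp
    · have ih' := ih (le_of_lt hlt)
      rw [ih']
      cases h : (pvSaP (l.take k) 0 none).2 <;> simp [h]

theorem pvBack_none (l : List Char) (k : Nat) (hk : k ≤ l.length) :
    pvBack l k none = (pvF l k).getLast? := by
  induction k with
  | zero => simp [pvBack, pvF, pvSaP]
  | succ k ih =>
    have hlt : k < l.length := by omega
    unfold pvF
    rw [pvTake_succ l k hlt]
    simp only [pvBack, List.getElem?_eq_getElem hlt, pvSaP_snoc, pvLenTake l k (le_of_lt hlt)]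
    by_cases hs : PySem.Chars.isspace (l[k]) <;> simp only [hs, if_true]
    · rw [ih (le_of_lt hlt)]
      unfold pvF
      cases h : (pvSaP (l.take k) 0 none).2 <;> simp [h]
    · rw [pvBack_some l k (le_of_lt hlt)]
      cases h : (pvSaP (l.take k) 0 none).2 <;> simp [h]

theorem pvClean (l : List Char) (k : Nat) (hk : k ≤ l.length) :
    (∀ s, (pvSaP (l.take k) 0 none).2 = some s →
      0 ≤ s ∧ s.toNat < k ∧ pvSaP (l.take s.toNat) 0 none = ((pvSaP (l.take k) 0 none).1, none)) ∧
    (∀ L' s e, (pvSaP (l.take k) 0 none).2 = none →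
      (pvSaP (l.take k) 0 none).1 = L' ++ [(s, e)] →
      0 ≤ s ∧ s.toNat < k ∧ pvSaP (l.take s.toNat) 0 none = (L', none)) := by
  induction k with
  | zero => simp [pvSaP]
  | succ k ih =>
    have hlt : k < l.length := by omega
    obtain ⟨iha, ihb⟩ := ih (le_of_lt hlt)
    have hts : l.take (k + 1) = l.take k ++ [l[k]] := pvTake_succ l k hlt
    rw [hts]
    simp only [pvSaP_snoc, pvLenTake l k (le_of_lt hlt)]
    by_cases hs : PySem.Chars.isspace (l[k]) <;> simp only [hs, if_true]
    · -- space: state becomes none, open span (if any) is closed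
      constructor
      · intro s hsome; simp at hsome
      · intro L' s e _ happ
        cases h : (pvSaP (l.take k) 0 none).2 with
        | none =>
          rw [h] at happ; simp at happ
          obtain ⟨h1, h2, h3⟩ := ihb L' s e h happ
          exact ⟨h1, by omega, h3⟩
        | some s0 =>
          rw [h] at happ
          simp only at happ
          obtain ⟨hL, hx⟩ := List.append_inj' happ rfl
          simp only [List.cons.injEq, Prod.mk.injEq, and_true] at hx
          obtain ⟨rfl, rfl⟩ := hx
          obtain ⟨h1, h2, h3⟩ := iha s0 h
          exact ⟨h1, by omega, by rw [h3, hL]⟩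
    · -- non-space: run stays open
      constructor
      · intro s hsome
        cases h : (pvSaP (l.take k) 0 none).2 with
        | some s0 =>
          rw [h] at hsome; simp at hsome
          obtain ⟨h1, h2, h3⟩ := iha s0 h
          rw [← hsome]
          exact ⟨h1, by omega, h3⟩
        | none =>
          rw [h] at hsome; simp at hsome
          rw [← hsome]
          refine ⟨by omega, by omega, ?_⟩
          have h0 : ((k : Int)).toNat = k := by omega
          rw [h0]
          have hp := h
          rcases hq : pvSaP (l.take k) 0 none with ⟨L0, st0⟩
          rw [hq] at hp
          simp at hp
          subst hp
          simp
      · intro L' s e hnone _; simp at hnone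

theorem pvGetD_dropLast (L : List (Int × Int)) (i : Nat) (hi : i < L.length - 1) :
    L.dropLast.getD i (0, 0) = L.getD i (0, 0) := by
  have h1 : i < L.dropLast.length := by simp [List.length_dropLast]; omega
  have h2 : i < L.length := by omega
  rw [List.getD_eq_getElem _ _ h1, List.getD_eq_getElem _ _ h2]
  simp [List.getElem_dropLast]

theorem pvStep (l : List Char) (k : Nat) (hk : k ≤ l.length) (s' e' : Int)
    (h : pvBack l k none = some (s', e')) :
    0 ≤ s' ∧ s'.toNat ≤ k ∧ pvF l s'.toNat = (pvF l k).dropLast := by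
  rw [pvBack_none l k hk] at h
  obtain ⟨ca, cb⟩ := pvClean l k hk
  cases hst : (pvSaP (l.take k) 0 none).2 with
  | some s0 =>
    unfold pvF at h ⊢
    rw [hst] at h
    simp only [List.getLast?_concat, Option.some.injEq, Prod.mk.injEq] at h
    obtain ⟨h1, h2, h3⟩ := ca s0 hst
    obtain ⟨rfl, rfl⟩ := h
    rw [hst, h3]
    refine ⟨h1, by omega, ?_⟩
    simp
  | none =>
    unfold pvF at h ⊢
    rw [hst] at h
    simp only [List.append_nil] at h
    obtain ⟨L', hL⟩ := List.getLast?_eq_some_iff.mp h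
    obtain ⟨h1, h2, h3⟩ := cb L' s' e' hst hL
    rw [hst, h3, hL]
    refine ⟨h1, by omega, ?_⟩
    simp

theorem pvOuter (l : List Char) (n : Nat) (s e : Int) (hs : 0 ≤ s) (hk : s.toNat ≤ l.length)
    (hn : 1 ≤ n) (hlen : n ≤ (pvF l s.toNat).length) :
    pvAOuter l n s e = (pvF l s.toNat).getD ((pvF l s.toNat).length - n) (0, 0) := by
  induction n generalizing s e with
  | zero => omega
  | succ m ih =>
    show (match pvAInner l (PySem.List.pyRange (s - 1) (-1) (-1)) none with
      | none => (s, e)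
      | some (s', e') => pvAOuter l m s' e') = _
    rw [show s - 1 = ((s.toNat : Nat) : Int) - 1 from by omega, pvAInner_eq_back,
      pvBack_none l s.toNat hk]
    cases hlast : (pvF l s.toNat).getLast? with
    | none =>
      rw [List.getLast?_eq_none_iff] at hlast
      rw [hlast] at hlen
      simp at hlen
    | some pr =>
      obtain ⟨s', e'⟩ := pr
      obtain ⟨h1, h2, h3⟩ := pvStep l s.toNat hk s' e' (by rw [pvBack_none l s.toNat hk, hlast])
      simp only
      cases m with
      | zero =>
        show (s', e') = _
        have hx := List.getLast?_eq_getElem? (l := pvF l s.toNat)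
        rw [hlast] at hx
        have h01 : (0 : Nat) + 1 = 1 := rfl
        rw [List.getD_eq_getElem?_getD, h01, ← hx]
        rfl
      | succ m' =>
        have hlen' : m' + 1 ≤ (pvF l s'.toNat).length := by
          rw [h3, List.length_dropLast]; omega
        rw [ih s' e' h1 (by omega) (by omega) hlen', h3, List.length_dropLast]
        rw [pvGetD_dropLast (pvF l s.toNat) ((pvF l s.toNat).length - 1 - (m' + 1)) (by omega)]
        congr 1
        omega

theorem pvBScan_go (l : List Char) (c : Int) (hc : 0 ≤ c) (hlen : c.toNat ≤ l.length)
    (fuel : Nat) : ∀ (i : Nat) (acc : List (Int × Int)) (st : Option Int),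
    fuel = c.toNat - i → i ≤ c.toNat →
    pvBScan l (PySem.List.pyRange (i : Int) c 1) acc st =
      some (acc ++ (pvSaP ((l.take c.toNat).drop i) (i : Int) st).1,
            (pvSaP ((l.take c.toNat).drop i) (i : Int) st).2) := by
  induction fuel with
  | zero =>
    intro i acc st hf hi
    have hieq : i = c.toNat := by omega
    have hrange : c ≤ (i : Int) := by omega
    rw [PySem.List.pyRange_one_eq_nil hrange]
    have hdrop : (l.take c.toNat).drop i = [] := by
      apply List.drop_eq_nil_of_le
      rw [pvLenTake l c.toNat hlen]; omega
    rw [hdrop]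
    simp [pvBScan, pvSaP]
  | succ fuel ih =>
    intro i acc st hf hi
    have hilt : i < c.toNat := by omega
    have hl : i < l.length := by omega
    have hcons : (l.take c.toNat).drop i = l[i] :: (l.take c.toNat).drop (i + 1) := by
      rw [List.drop_eq_getElem_cons (by rw [pvLenTake l c.toNat hlen]; omega)]
      congr 1
      exact List.getElem_take
    rw [PySem.List.pyRange_one_cons (by omega), hcons]
    show (match PySem.List.pyGet? l (i : Int) with
      | none => none
      | some ch => _) = _
    rw [PySem.List.pyGet?_natCast, List.getElem?_eq_getElem hl]
    simp only
    have hcast : ((i : Int) + 1) = ((i + 1 : Nat) : Int) := by push_cast; ring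
    by_cases hsp : PySem.Chars.isspace (l[i]) <;> simp only [hsp, Bool.false_eq_true, if_true, if_false]
    · cases st with
      | some s =>
        show pvBScan l (PySem.List.pyRange ((i : Int) + 1) c 1) (acc ++ [(s, (i : Int))]) none = _
        rw [hcast, ih (i + 1) _ none (by omega) (by omega)]
        simp [pvSaP, hsp]
      | none =>
        show pvBScan l (PySem.List.pyRange ((i : Int) + 1) c 1) acc none = _
        rw [hcast, ih (i + 1) _ none (by omega) (by omega)]
        simp [pvSaP, hsp]
    · cases st with
      | some s =>
        show pvBScan l (PySem.List.pyRange ((i : Int) + 1) c 1) acc (some s) = _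
        rw [hcast, ih (i + 1) _ (some s) (by omega) (by omega)]
        simp [pvSaP, hsp]
      | none =>
        show pvBScan l (PySem.List.pyRange ((i : Int) + 1) c 1) acc (some (i : Int)) = _
        rw [hcast, ih (i + 1) _ (some (i : Int)) (by omega) (by omega)]
        simp [pvSaP, hsp]

theorem pvBScan_eq (l : List Char) (c : Int) (hc : 0 ≤ c) (hlen : c.toNat ≤ l.length) :
    pvBScan l (PySem.List.pyRange 0 c 1) [] none = some (pvSaP (l.take c.toNat) 0 none) := by
  have := pvBScan_go l c hc hlen (c.toNat - 0) 0 [] none rfl (by omega)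
  simp only [Nat.cast_zero, List.drop_zero, List.nil_append] at this
  rw [this]

theorem pvCount (l : List Char) (k : Nat) (hk : k ≤ l.length) :
    (pvF l k).length = (pvStarts l k).length ∧
    ((pvSaP (l.take k) 0 none).2 = none ↔ (k = 0 ∨ pvIsSp l (k - 1) = true)) := by
  induction k with
  | zero => exact ⟨by simp [pvF, pvSaP, pvStarts], by simp [pvSaP]⟩
  | succ k ih =>
    have hlt : k < l.length := by omega
    obtain ⟨ihl, ihst⟩ := ih (le_of_lt hlt)
    have hgetd : l.getD k ' ' = l[k] := by
      simp [List.getD_eq_getElem?_getD, List.getElem?_eq_getElem hlt]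
    have hsplit : (pvStarts l (k + 1)).length = (pvStarts l k).length +
        (if (!pvIsSp l k && (decide (k = 0) || pvIsSp l (k - 1))) = true then 1 else 0) := by
      unfold pvStarts
      rw [List.range_succ, List.filter_append, List.length_append]
      congr 1
      cases hb : (!pvIsSp l k && (decide (k = 0) || pvIsSp l (k - 1))) <;>
        simp [List.filter, hb]
    have hts := pvTake_succ l k hlt
    by_cases hs : PySem.Chars.isspace (l[k])
    · have hsp : pvIsSp l k = true := by unfold pvIsSp; rw [hgetd]; exact hs
      have hb0 : (!pvIsSp l k && (decide (k = 0) || pvIsSp l (k - 1))) = false := by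
        simp [hsp]
      have hst' : (pvSaP (l.take (k + 1)) 0 none).2 = none := by
        rw [hts, pvSaP_snoc]; simp [hs]
      have hFlen : (pvF l (k + 1)).length = (pvF l k).length := by
        unfold pvF
        rw [hts, pvSaP_snoc]
        simp only [hs, if_true, pvLenTake l k (le_of_lt hlt)]
        cases h2 : (pvSaP (l.take k) 0 none).2 <;> simp [h2]
      refine ⟨?_, ?_⟩
      · rw [hFlen, hsplit, ihl, hb0]
        simp
      · simp only [hst', Nat.add_sub_cancel, true_iff]
        exact Or.inr hsp
    · have hsp : pvIsSp l k = false := by unfold pvIsSp; rw [hgetd]; simp [hs]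
      have hst' : ∃ s0, (pvSaP (l.take (k + 1)) 0 none).2 = some s0 := by
        rw [hts, pvSaP_snoc]; simp [hs]
      cases hst : (pvSaP (l.take k) 0 none).2 with
      | none =>
        have hstart : (k = 0 ∨ pvIsSp l (k - 1) = true) := ihst.mp hst
        have hb1 : (!pvIsSp l k && (decide (k = 0) || pvIsSp l (k - 1))) = true := by
          simp [hsp]
          exact hstart
        have hFlen : (pvF l (k + 1)).length = (pvF l k).length + 1 := by
          unfold pvF; rw [hts, pvSaP_snoc]
          simp [hs, hst]
        refine ⟨?_, ?_⟩
        · rw [hFlen, hsplit, ihl, hb1]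
          simp
        · obtain ⟨s0, hs0⟩ := hst'
          simp [hs0, hsp]
      | some s0 =>
        have hnstart : ¬(k = 0 ∨ pvIsSp l (k - 1) = true) := by
          intro hcon
          have hcc := ihst.mpr hcon
          rw [hst] at hcc
          simp at hcc
        have hb0 : (!pvIsSp l k && (decide (k = 0) || pvIsSp l (k - 1))) = false := by
          rw [Bool.eq_false_iff]
          intro hbc
          simp at hbc
          exact hnstart hbc.2
        have hFlen : (pvF l (k + 1)).length = (pvF l k).length := by
          unfold pvF; rw [hts, pvSaP_snoc]
          simp [hs, hst]
        refine ⟨?_, ?_⟩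
        · rw [hFlen, hsplit, ihl, hb0]
          simp
        · obtain ⟨s1, hs1⟩ := hst'
          simp [hs1, hsp]

-- ===== VERDICT (by name: the statement is the Claim_ definition above) =====
set_option maxHeartbeats 1000000 in
theorem find_prev_token_span_py_spec : Claim_equal_find_prev_token_span_py := by
  intro c seq order _ hpre
  unfold Spec_find_prev_token_span_py find_prev_token_span_py find_prev_token_span_py_alt
  by_cases ho : order ≤ 0
  · rw [if_pos ho]
    have h0 : order.toNat = 0 := by omega
    rw [h0]
    rfl
  · rw [if_neg ho]
    obtain h | ⟨h0c, hclen, horder⟩ := hpre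
    · omega
    have hkl : c.toNat ≤ seq.toList.length := by omega
    rw [show min c.toNat seq.toList.length = c.toNat from by omega] at horder
    have hcnt := (pvCount seq.toList c.toNat hkl).1
    have hlenF : order.toNat ≤ (pvF seq.toList c.toNat).length := by
      rw [hcnt]; omega
    rw [pvBScan_eq seq.toList c h0c hkl]
    set P := pvSaP (seq.toList.take c.toNat) 0 none with hPdef
    show pvAOuter seq.toList order.toNat c c =
      if ((P.1 ++ (match P.2 with | some s => [(s, c)] | none => [])).length : Int) < order
      then ((0 : Int), (0 : Int))
      else (PySem.List.pyGet?
        (P.1 ++ (match P.2 with | some s => [(s, c)] | none => [])) (-order)).getD (0, 0)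
    have hFF : pvF seq.toList c.toNat =
        P.1 ++ (match P.2 with | some s => [(s, c)] | none => []) := by
      unfold pvF
      rw [← hPdef]
      cases h2 : P.2 <;> simp [Int.toNat_of_nonneg h0c]
    rw [← hFF]
    have hnlt : ¬ (((pvF seq.toList c.toNat).length : Int) < order) := by omega
    rw [if_neg hnlt]
    have hneg : -order = -((order.toNat : Nat) : Int) := by omega
    rw [hneg, PySem.List.pyGet?_neg_natCast _ order.toNat (by omega) hlenF]
    rw [pvOuter seq.toList order.toNat c c h0c hkl (by omega) hlenF]
    rw [List.getD_eq_getElem?_getD]
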